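-- pv_equiv track=rewrite | github.com/rafuchos/pokerAnalyser | src/config.py | _split_key_value
-- ===== SOURCE A (Python) =====
-- def _split_key_value(line: str) -> tuple:
--     """Split 'key: value' on the first top-level colon."""
--     depth = 0
--     for idx, ch in enumerate(line):
--         if ch in '[{':
--             depth += 1
--         elif ch in ']}':
--             depth -= 1
--         elif ch == ':' and depth == 0:
--             return line[:idx], line[idx + 1:]
--     return line, ''
-- ===== SOURCE B (Python) =====
-- def _split_key_value(line: str) -> tuple:
--     """Split 'key: value' on the first top-level colon (candidate-then-recheck)."""
--     colons = [i for i, ch in enumerate(line) if ch == ':']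
--     for i in colons:
--         pre = line[:i]
--         if pre.count('[') + pre.count('{') == pre.count(']') + pre.count('}'):
--             return line[:i], line[i + 1:]
--     return line, ''
-- ===== Notes on version B (the rewrite author's own statement) =====
-- stated objective: alternative
-- what changed: Replaces A's single stateful depth-tracking pass with a two-phase strategy: first collect all colon positions, then for each candidate re-scan its prefix and compare bracket counts, returning at the first balanced candidate.
import Mathlib
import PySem

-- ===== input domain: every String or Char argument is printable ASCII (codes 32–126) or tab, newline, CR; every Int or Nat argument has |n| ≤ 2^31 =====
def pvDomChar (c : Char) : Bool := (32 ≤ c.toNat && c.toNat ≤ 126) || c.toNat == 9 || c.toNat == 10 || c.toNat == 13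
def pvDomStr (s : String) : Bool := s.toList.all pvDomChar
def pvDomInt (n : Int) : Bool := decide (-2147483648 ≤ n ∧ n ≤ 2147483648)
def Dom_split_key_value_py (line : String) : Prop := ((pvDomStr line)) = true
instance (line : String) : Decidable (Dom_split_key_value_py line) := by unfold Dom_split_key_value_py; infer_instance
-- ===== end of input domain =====

-- B replaces A's single stateful depth pass by collecting colon positions and re-checking each
-- candidate's prefix bracket counts (alternative decomposition, same results).

-- ===== PORT A =====
-- line[:idx] / line[idx+1:] with idx : Nat are exactly List.take idx / List.drop (idx+1)
def splitGoA (line : List Char) (cs : List Char) (idx : Nat) (depth : Int) : String × String :=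
  match cs with
  | [] => (String.ofList line, "")
  | ch :: tl =>
    if ch = '[' ∨ ch = '{' then splitGoA line tl (idx + 1) (depth + 1)
    else if ch = ']' ∨ ch = '}' then splitGoA line tl (idx + 1) (depth - 1)
    else if ch = ':' ∧ depth = 0 then (String.ofList (line.take idx), String.ofList (line.drop (idx + 1)))
    else splitGoA line tl (idx + 1) depth

def split_key_value_py (line : String) : String × String :=
  splitGoA line.toList line.toList 0 0

-- ===== PORT B =====
-- pre.count(c) is exactly List.count c pre
def balB (pre : List Char) : Int :=
  ((pre.count '[' : Int) + (pre.count '{' : Int)) - ((pre.count ']' : Int) + (pre.count '}' : Int))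

def findColonB (line : List Char) : List Nat → Option Nat
  | [] => none
  | i :: rest => if balB (line.take i) = 0 then some i else findColonB line rest

def split_key_value_py_alt (line : String) : String × String :=
  let cs := line.toList
  let colons := (List.range cs.length).filter (fun i => cs[i]? = some ':')
  match findColonB cs colons with
  | some i => (String.ofList (cs.take i), String.ofList (cs.drop (i + 1)))
  | none => (String.ofList cs, "")

-- ===== PRECONDITION & SPEC =====
def Spec_split_key_value_py (line : String) (out : String × String) : Prop := out = split_key_value_py_alt line
instance (line : String) (out : String × String) : Decidable (Spec_split_key_value_py line out) := by unfold Spec_split_key_value_py; infer_instance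

-- ===== CLAIM (what is proved, stated in full; the proofs are below) =====
def Claim_equal_split_key_value_py : Prop := ∀ (line : String), Dom_split_key_value_py line → Spec_split_key_value_py line (split_key_value_py line)

-- ===== LEMMAS AND PROOFS =====

-- common characterisation: first index i ≥ k with l[i] = ':' and balanced prefix
def findGood (l : List Char) (k : Nat) : Option Nat :=
  if h : k < l.length then
    if l[k]? = some ':' ∧ balB (l.take k) = 0 then some k else findGood l (k + 1)
  else none
termination_by l.length - k

def outOf (cs : List Char) : Option Nat → String × String
  | some i => (String.ofList (cs.take i), String.ofList (cs.drop (i + 1)))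
  | none => (String.ofList cs, "")

lemma balB_take_succ (l : List Char) (k : Nat) (h : k < l.length) :
    balB (l.take (k + 1)) = balB (l.take k) +
      (if l[k] = '[' ∨ l[k] = '{' then 1 else if l[k] = ']' ∨ l[k] = '}' then -1 else 0) := by
  have key : ∀ (pre : List Char) (c : Char), balB (pre ++ [c]) = balB pre +
      (if c = '[' ∨ c = '{' then 1 else if c = ']' ∨ c = '}' then -1 else 0) := by
    intro pre c
    simp only [balB, List.count_append, List.count_cons, List.count_nil]
    by_cases h1 : c = '[' <;> by_cases h2 : c = '{' <;> by_cases h3 : c = ']' <;>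
      by_cases h4 : c = '}' <;> simp_all <;> omega
  rw [List.take_add_one, List.getElem?_eq_getElem h]
  exact key _ _

lemma A_char (l : List Char) (k : Nat) :
    splitGoA l (l.drop k) k (balB (l.take k)) = outOf l (findGood l k) := by
  by_cases h : k < l.length
  · have hd : l.drop k = l[k] :: l.drop (k + 1) := List.drop_eq_getElem_cons h
    have hbs := balB_take_succ l k h
    rw [hd, splitGoA, findGood]
    simp only [h, dif_pos]
    by_cases h1 : l[k] = '[' ∨ l[k] = '{'
    · have hne : ¬ (l[k]? = some ':' ∧ balB (l.take k) = 0) := by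
        rw [List.getElem?_eq_getElem h]; rcases h1 with h1 | h1 <;> simp [h1]
      rw [if_pos h1, if_neg hne]
      have : balB (l.take k) + 1 = balB (l.take (k + 1)) := by rw [hbs]; simp [h1]; try omega
      rw [this]
      exact A_char l (k + 1)
    · by_cases h2 : l[k] = ']' ∨ l[k] = '}'
      · have hne : ¬ (l[k]? = some ':' ∧ balB (l.take k) = 0) := by
          rw [List.getElem?_eq_getElem h]; rcases h2 with h2 | h2 <;> simp [h2]
        rw [if_neg h1, if_pos h2, if_neg hne]
        have : balB (l.take k) - 1 = balB (l.take (k + 1)) := by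
          rw [hbs]; simp [h1, h2]; try omega
        rw [this]
        exact A_char l (k + 1)
      · rw [if_neg h1, if_neg h2]
        by_cases h3 : l[k] = ':' ∧ balB (l.take k) = 0
        · have : l[k]? = some ':' ∧ balB (l.take k) = 0 := by
            rw [List.getElem?_eq_getElem h]; exact ⟨by simp [h3.1], h3.2⟩
          rw [if_pos h3, if_pos this]
          rfl
        · have hne : ¬ (l[k]? = some ':' ∧ balB (l.take k) = 0) := by
            rw [List.getElem?_eq_getElem h]; simpa using h3
          rw [if_neg h3, if_neg hne]
          have : balB (l.take k) = balB (l.take (k + 1)) := by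
            rw [hbs]; simp [h1, h2]
          rw [this]
          exact A_char l (k + 1)
  · have hd : l.drop k = [] := List.drop_eq_nil_of_le (by omega)
    rw [hd, splitGoA, findGood]
    simp [h, outOf]
termination_by l.length - k

lemma B_char (l : List Char) (k : Nat) :
    findColonB l ((List.range' k (l.length - k)).filter (fun i => l[i]? = some ':')) =
      findGood l k := by
  by_cases h : k < l.length
  · have hr : List.range' k (l.length - k) = k :: List.range' (k + 1) (l.length - (k + 1)) := by
      have : l.length - k = (l.length - (k + 1)) + 1 := by omega
      rw [this, List.range'_succ]
    rw [hr, findGood]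
    simp only [h, dif_pos, List.filter_cons]
    by_cases hc : l[k]? = some ':'
    · rw [if_pos (by simpa using hc), findColonB]
      by_cases hb : balB (l.take k) = 0
      · rw [if_pos hb, if_pos ⟨hc, hb⟩]
      · rw [if_neg hb, if_neg (by simp [hb])]
        exact B_char l (k + 1)
    · rw [if_neg (by simpa using hc), if_neg (by simp [hc])]
      exact B_char l (k + 1)
  · have : l.length - k = 0 := by omega
    rw [this, findGood]
    simp [h, List.range', findColonB]
termination_by l.length - k

-- ===== VERDICT (by name: the statement is the Claim_ definition above) =====
theorem split_key_value_py_spec : Claim_equal_split_key_value_py := by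
  intro line _
  show split_key_value_py line = split_key_value_py_alt line
  unfold split_key_value_py split_key_value_py_alt
  have hA := A_char line.toList 0
  simp only [List.drop_zero, List.take_zero] at hA
  have hb0 : balB ([] : List Char) = 0 := by decide
  rw [hb0] at hA
  rw [hA]
  have hB := B_char line.toList 0
  rw [Nat.sub_zero, ← List.range_eq_range'] at hB
  simp only [hB]
  cases hg : findGood line.toList 0 <;> simp [outOf]
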